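-- pv_equiv track=rewrite | github.com/ssjalsk/buzfilter-auto | aligo_master.py | find_current_block_start
-- ===== SOURCE A (Python) =====
-- def find_current_block_start(rows, no_col=0):
--     """A열 번호가 1로 재시작되는 마지막 위치 반환"""
--     last_start = 0
--     prev_num = 0
--     for i, row in enumerate(rows):
--         if len(row) > no_col:
--             cell = str(row[no_col]).strip()
--             try:
--                 num = int(cell)
--                 if num == 1 and prev_num >= 5:
--                     last_start = i
--                 prev_num = num
--             except:
--                 pass
--     return last_start
-- ===== SOURCE B (Python) =====
-- def find_current_block_start(rows, no_col=0):
--     """A열 번호가 1로 재시작되는 마지막 위치 반환"""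
--     parsed = []
--     for i, row in enumerate(rows):
--         if len(row) > no_col:
--             cell = str(row[no_col]).strip()
--             try:
--                 parsed.append((i, int(cell)))
--             except:
--                 pass
--     pairs = list(zip(parsed, parsed[1:]))
--     for (_, prev_num), (i, num) in reversed(pairs):
--         if num == 1 and prev_num >= 5:
--             return i
--     return 0
-- ===== Notes on version B (the rewrite author's own statement) =====
-- stated objective: alternative
-- what changed: Replaces the single stateful scan with a parse phase building a (index, value) table and a backward scan over consecutive pairs that returns on the first (i.e. last) restart, allowing early exit.
import Mathlib
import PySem

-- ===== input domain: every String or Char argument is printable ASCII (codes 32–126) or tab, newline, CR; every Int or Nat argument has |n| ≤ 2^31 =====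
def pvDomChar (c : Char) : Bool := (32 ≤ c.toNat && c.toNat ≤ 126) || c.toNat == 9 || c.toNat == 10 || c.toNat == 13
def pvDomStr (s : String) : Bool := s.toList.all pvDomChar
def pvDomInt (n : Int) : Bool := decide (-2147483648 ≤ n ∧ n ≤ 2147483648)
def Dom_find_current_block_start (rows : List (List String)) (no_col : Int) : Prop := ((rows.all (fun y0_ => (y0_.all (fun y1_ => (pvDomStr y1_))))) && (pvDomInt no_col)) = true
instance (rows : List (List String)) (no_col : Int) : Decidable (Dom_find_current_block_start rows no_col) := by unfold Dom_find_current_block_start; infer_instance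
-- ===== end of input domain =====

-- B rebuilds the task as a parse phase (table of (index, parsed int)) plus a
-- backward scan over consecutive pairs that returns at the first (= last) restart;
-- alternative decomposition, return value proved equal to A's on Pre_.

-- ===== PORT A =====
-- literal transliteration of A's single stateful scan; state = (last_start, prev_num).
-- pyGet? = none is Python's IndexError (row[no_col] with a too-negative index), excluded by Pre_.
def find_current_block_start (rows : List (List String)) (no_col : Int) : Int :=
  ((PySem.List.enumerate rows 0).foldl
    (fun st p =>
      if ((p.2.length : Int)) > no_col then
        match PySem.List.pyGet? p.2 no_col with
        | some cell =>
          match PySem.Int.ofStr? (PySem.Str.strip cell) with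
          | some num => ((if num = 1 ∧ st.2 ≥ 5 then p.1 else st.1), num)
          | none => st
        | none => st
      else st)
    ((0 : Int), (0 : Int))).1

-- ===== PORT B =====
-- phase 1: table of (row index, parsed number) for every successfully parsed row
def fcbsParsed (rows : List (List String)) (no_col : Int) : List (Int × Int) :=
  (PySem.List.enumerate rows 0).filterMap
    (fun p =>
      if ((p.2.length : Int)) > no_col then
        match PySem.List.pyGet? p.2 no_col with
        | some cell => (PySem.Int.ofStr? (PySem.Str.strip cell)).map (fun num => (p.1, num))
        | none => none
      else none)

-- phase 2: first restart found while walking the pair list backwards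
def fcbsScan : List ((Int × Int) × (Int × Int)) → Int
  | [] => 0
  | (q, c) :: rest => if c.2 = 1 ∧ q.2 ≥ 5 then c.1 else fcbsScan rest

def find_current_block_start_alt (rows : List (List String)) (no_col : Int) : Int :=
  let parsed := fcbsParsed rows no_col
  fcbsScan ((parsed.zip parsed.tail).reverse)

-- ===== PRECONDITION & SPEC =====
-- Pre_ excludes exactly the inputs where Python A raises IndexError: a negative
-- no_col together with some row shorter than |no_col| (len(row) > no_col always
-- holds for negative no_col, and row[no_col] then wraps past the front).
def Pre_find_current_block_start (rows : List (List String)) (no_col : Int) : Prop :=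
  0 ≤ no_col ∨ ∀ row ∈ rows, -no_col ≤ (row.length : Int)
instance (rows : List (List String)) (no_col : Int) : Decidable (Pre_find_current_block_start rows no_col) := by unfold Pre_find_current_block_start; infer_instance

def pvWitness_find_current_block_start : List (List String) × Int :=
  ([["7"], ["1"], ["5"], ["1"], ["x"]], 0)

def Spec_find_current_block_start (rows : List (List String)) (no_col : Int) (out : Int) : Prop := out = find_current_block_start_alt rows no_col
instance (rows : List (List String)) (no_col : Int) (out : Int) : Decidable (Spec_find_current_block_start rows no_col out) := by unfold Spec_find_current_block_start; infer_instance

-- ===== CLAIM (what is proved, stated in full; the proofs are below) =====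
def Claim_equal_find_current_block_start : Prop := ∀ (rows : List (List String)) (no_col : Int), Dom_find_current_block_start rows no_col → Pre_find_current_block_start rows no_col → Spec_find_current_block_start rows no_col (find_current_block_start rows no_col)

-- ===== LEMMAS AND PROOFS =====

-- named forms of the loop bodies (definitionally the ports' inline lambdas)
def pvAstep (no_col : Int) (st : Int × Int) (p : Int × List String) : Int × Int :=
  if ((p.2.length : Int)) > no_col then
    match PySem.List.pyGet? p.2 no_col with
    | some cell =>
      match PySem.Int.ofStr? (PySem.Str.strip cell) with
      | some num => ((if num = 1 ∧ st.2 ≥ 5 then p.1 else st.1), num)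
      | none => st
    | none => st
  else st

def pvParse (no_col : Int) (p : Int × List String) : Option (Int × Int) :=
  if ((p.2.length : Int)) > no_col then
    match PySem.List.pyGet? p.2 no_col with
    | some cell => (PySem.Int.ofStr? (PySem.Str.strip cell)).map (fun num => (p.1, num))
    | none => none
  else none

def pvStep (st : Int × Int) (q : Int × Int) : Int × Int :=
  ((if q.2 = 1 ∧ st.2 ≥ 5 then q.1 else st.1), q.2)

def pvPairf (acc : Int) (pc : (Int × Int) × (Int × Int)) : Int :=
  if pc.2.2 = 1 ∧ pc.1.2 ≥ 5 then pc.2.1 else acc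

-- A's scan over the raw rows equals the compressed scan over the parse table
theorem pv_fold_filter (no_col : Int) :
    ∀ (l : List (Int × List String)) (st : Int × Int),
      l.foldl (pvAstep no_col) st = (l.filterMap (pvParse no_col)).foldl pvStep st := by
  intro l
  induction l with
  | nil => intro st; rfl
  | cons p t ih =>
    intro st
    simp only [List.foldl_cons, List.filterMap_cons]
    by_cases h : ((p.2.length : Int)) > no_col
    · cases hg : PySem.List.pyGet? p.2 no_col with
      | none => simp [pvAstep, pvParse, h, hg, ih]
      | some cell =>
        cases ho : PySem.Int.ofStr? (PySem.Str.strip cell) with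
        | none => simp [pvAstep, pvParse, h, hg, ho, ih]
        | some num => simp [pvAstep, pvParse, pvStep, h, hg, ho, ih]
    · simp [pvAstep, pvParse, h, ih]

-- the stateful scan over the table equals a fold over consecutive pairs
theorem pv_fold_pairs :
    ∀ (P : List (Int × Int)) (ls pv x : Int),
      (P.foldl pvStep (ls, pv)).1 = (((x, pv) :: P).zip P).foldl pvPairf ls := by
  intro P
  induction P with
  | nil => intro ls pv x; rfl
  | cons q t ih =>
    intro ls pv x
    simp only [List.foldl_cons, List.zip_cons_cons]
    rw [show pvStep (ls, pv) q = ((if q.2 = 1 ∧ pv ≥ 5 then q.1 else ls), q.2) from rfl]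
    rw [ih _ _ q.1]
    rfl

-- the backward early-exit scan equals the forward fold over the pairs
theorem pv_scan_rev :
    ∀ (l : List ((Int × Int) × (Int × Int))), fcbsScan l.reverse = l.foldl pvPairf 0 := by
  intro l
  induction l using List.reverseRecOn with
  | nil => rfl
  | append_singleton t a ih =>
    rw [List.reverse_append, List.foldl_append]
    simp only [List.reverse_cons, List.reverse_nil, List.nil_append, List.singleton_append,
      List.foldl_cons, List.foldl_nil]
    obtain ⟨q, c⟩ := a
    simp only [fcbsScan, pvPairf]
    split_ifs with h
    · rfl
    · exact ih

theorem pv_main (rows : List (List String)) (no_col : Int) :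
    find_current_block_start rows no_col = find_current_block_start_alt rows no_col := by
  show ((PySem.List.enumerate rows 0).foldl (pvAstep no_col) ((0 : Int), (0 : Int))).1 =
    find_current_block_start_alt rows no_col
  rw [pv_fold_filter]
  have hP : (PySem.List.enumerate rows 0).filterMap (pvParse no_col) = fcbsParsed rows no_col := rfl
  rw [hP]
  unfold find_current_block_start_alt
  cases hp : fcbsParsed rows no_col with
  | nil => rfl
  | cons h t =>
    rw [pv_fold_pairs (h :: t) 0 0 0, pv_scan_rev]
    simp only [List.zip_cons_cons, List.foldl_cons, List.tail_cons]
    rw [show pvPairf 0 ((0, 0), h) = 0 by simp [pvPairf]]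

-- ===== VERDICT (by name: the statement is the Claim_ definition above) =====
theorem find_current_block_start_spec : Claim_equal_find_current_block_start := by
  intro rows no_col _ _
  unfold Spec_find_current_block_start
  exact pv_main rows no_col
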